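-- pv_equiv track=rewrite | github.com/browlm13/OS_Simulations | sim_v2.py | wait_time
-- ===== SOURCE A (Python) =====
-- def wait_time(gnatt, pid):
--     t = 0
--
--     #find last occurence of pid
--     last_occurence_index = 0
--     for i in range(len(gnatt)):
--         if gnatt[i][0] == pid:
--             last_occurence_index = i
--
--     #until last occurance of pid
--     for i in range(last_occurence_index):
--         if gnatt[i][0] != pid:
--             t += gnatt[i][1]
--     return t
-- ===== SOURCE B (Python) =====
-- def wait_time(gnatt, pid):
--     # single pass: `running` = sum of non-pid durations so far;
--     # snapshot it into `t` at every pid occurrence (so the last occurrence wins)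
--     running = 0
--     t = 0
--     for p, dur in gnatt:
--         if p == pid:
--             t = running
--         else:
--             running += dur
--     return t
-- ===== Notes on version B (the rewrite author's own statement) =====
-- stated objective: simpler
-- what changed: Replaces A's two-pass find-last-index-then-sum-prefix structure by one pass over the entries that keeps a running non-pid duration total and snapshots it at each pid occurrence (last snapshot wins), removing index arithmetic entirely.
import Mathlib
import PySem

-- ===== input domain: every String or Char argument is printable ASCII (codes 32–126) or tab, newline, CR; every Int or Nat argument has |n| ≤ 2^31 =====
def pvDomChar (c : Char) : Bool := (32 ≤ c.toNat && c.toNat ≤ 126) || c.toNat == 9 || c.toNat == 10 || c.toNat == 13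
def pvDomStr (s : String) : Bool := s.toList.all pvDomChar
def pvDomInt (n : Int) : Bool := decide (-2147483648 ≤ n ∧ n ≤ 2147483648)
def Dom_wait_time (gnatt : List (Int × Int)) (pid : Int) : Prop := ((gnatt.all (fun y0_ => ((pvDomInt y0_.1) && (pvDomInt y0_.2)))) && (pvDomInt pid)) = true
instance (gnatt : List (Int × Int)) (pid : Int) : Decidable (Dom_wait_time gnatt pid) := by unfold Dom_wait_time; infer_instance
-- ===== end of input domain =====

-- B replaces A's two passes (find last pid index, then sum the non-pid durations before it)
-- by one pass that keeps a running non-pid total and snapshots it at each pid occurrence.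

-- ===== PORT A =====
-- literal transliteration of A: first loop finds the last index with gnatt[i][0] == pid,
-- second loop sums gnatt[i][1] over i < last_occurence_index with gnatt[i][0] != pid.
def wait_time (gnatt : List (Int × Int)) (pid : Int) : Int :=
  let last_occurence_index : Int :=
    (PySem.List.pyRange 0 gnatt.length 1).foldl
      (fun acc i => if (PySem.List.pyGetD gnatt i (0, 0)).1 = pid then i else acc) 0
  (PySem.List.pyRange 0 last_occurence_index 1).foldl
    (fun t i => if (PySem.List.pyGetD gnatt i (0, 0)).1 ≠ pid
                then t + (PySem.List.pyGetD gnatt i (0, 0)).2 else t) 0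

-- ===== PORT B =====
-- literal transliteration of B: one fold over the entries with state (running, t).
def wait_time_alt (gnatt : List (Int × Int)) (pid : Int) : Int :=
  (gnatt.foldl
    (fun (st : Int × Int) e => if e.1 = pid then (st.1, st.1) else (st.1 + e.2, st.2))
    (0, 0)).2

-- ===== PRECONDITION & SPEC =====
def Spec_wait_time (gnatt : List (Int × Int)) (pid : Int) (out : Int) : Prop := out = wait_time_alt gnatt pid
instance (gnatt : List (Int × Int)) (pid : Int) (out : Int) : Decidable (Spec_wait_time gnatt pid out) := by unfold Spec_wait_time; infer_instance

-- ===== CLAIM (what is proved, stated in full; the proofs are below) =====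
def Claim_equal_wait_time : Prop := ∀ (gnatt : List (Int × Int)) (pid : Int), Dom_wait_time gnatt pid → Spec_wait_time gnatt pid (wait_time gnatt pid)

-- ===== LEMMAS AND PROOFS =====

-- proof-only helpers: A's two loops, named
def pvLastIdx (gnatt : List (Int × Int)) (pid : Int) : Int :=
  (PySem.List.pyRange 0 gnatt.length 1).foldl
    (fun acc i => if (PySem.List.pyGetD gnatt i (0, 0)).1 = pid then i else acc) 0

def pvSumTo (gnatt : List (Int × Int)) (pid : Int) (m : Int) : Int :=
  (PySem.List.pyRange 0 m 1).foldl
    (fun t i => if (PySem.List.pyGetD gnatt i (0, 0)).1 ≠ pid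
                then t + (PySem.List.pyGetD gnatt i (0, 0)).2 else t) 0

-- sum of non-pid durations over the whole list
def pvSumNP (gnatt : List (Int × Int)) (pid : Int) : Int :=
  gnatt.foldl (fun t e => if e.1 ≠ pid then t + e.2 else t) 0

theorem pv_wait_time_eq (gnatt : List (Int × Int)) (pid : Int) :
    wait_time gnatt pid = pvSumTo gnatt pid (pvLastIdx gnatt pid) := rfl

theorem pv_pyGetD_append_left (xs : List (Int × Int)) (e : Int × Int) (i : Int)
    (h0 : 0 ≤ i) (h : i < xs.length) :
    PySem.List.pyGetD (xs ++ [e]) i (0, 0) = PySem.List.pyGetD xs i (0, 0) := by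
  rw [PySem.List.pyGetD_eq_getElem (xs ++ [e]) (0, 0) h0 (by simp; omega),
      PySem.List.pyGetD_eq_getElem xs (0, 0) h0 (by simpa using h)]
  exact List.getElem_append_left (by omega)

theorem pv_pyGetD_append_last (xs : List (Int × Int)) (e : Int × Int) :
    PySem.List.pyGetD (xs ++ [e]) (xs.length : Int) (0, 0) = e := by
  rw [PySem.List.pyGetD_eq_getElem (xs ++ [e]) (0, 0) (by positivity) (by simp)]
  simp

-- bounds for A's last-index loop
theorem pv_lastIdx_bounds (gnatt : List (Int × Int)) (pid : Int) :
    0 ≤ pvLastIdx gnatt pid ∧ pvLastIdx gnatt pid ≤ (gnatt.length : Int) := by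
  unfold pvLastIdx
  have H : ∀ (l : List Int) (b : Int), (∀ x ∈ l, 0 ≤ x ∧ x < b) → ∀ init : Int,
      0 ≤ init → init ≤ b →
      0 ≤ l.foldl (fun acc i => if (PySem.List.pyGetD gnatt i (0, 0)).1 = pid then i else acc) init ∧
      l.foldl (fun acc i => if (PySem.List.pyGetD gnatt i (0, 0)).1 = pid then i else acc) init ≤ b := by
    intro l
    induction l with
    | nil => intro b _ init h0 h1; exact ⟨h0, h1⟩
    | cons x l ih =>
      intro b hmem init h0 h1
      simp only [List.foldl_cons]
      have hx := hmem x (by simp)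
      exact ih b (fun y hy => hmem y (by simp [hy])) _ (by split <;> omega) (by split <;> omega)
  exact H _ _ (fun x hx => by
      rw [PySem.List.mem_pyRange_one] at hx; exact hx) 0 le_rfl (by positivity)

theorem pv_lastIdx_append (xs : List (Int × Int)) (e : Int × Int) (pid : Int) :
    pvLastIdx (xs ++ [e]) pid =
      if e.1 = pid then (xs.length : Int) else pvLastIdx xs pid := by
  unfold pvLastIdx
  have hlen : ((xs ++ [e]).length : Int) = (xs.length : Int) + 1 := by simp
  rw [hlen, PySem.List.pyRange_one_succ_right (by positivity), List.foldl_append]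
  have hpref :
      (PySem.List.pyRange 0 (xs.length : Int) 1).foldl
        (fun acc i => if (PySem.List.pyGetD (xs ++ [e]) i (0, 0)).1 = pid then i else acc) 0 =
      (PySem.List.pyRange 0 (xs.length : Int) 1).foldl
        (fun acc i => if (PySem.List.pyGetD xs i (0, 0)).1 = pid then i else acc) 0 := by
    apply PySem.List.foldl_congr_mem
    intro acc x hx
    rw [PySem.List.mem_pyRange_one] at hx
    rw [pv_pyGetD_append_left xs e x hx.1 hx.2]
  rw [hpref]
  simp only [List.foldl_cons, List.foldl_nil, pv_pyGetD_append_last]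

theorem pv_sumTo_append (xs : List (Int × Int)) (e : Int × Int) (pid : Int) (m : Int)
    (hm : m ≤ (xs.length : Int)) :
    pvSumTo (xs ++ [e]) pid m = pvSumTo xs pid m := by
  unfold pvSumTo
  apply PySem.List.foldl_congr_mem
  intro acc x hx
  rw [PySem.List.mem_pyRange_one] at hx
  rw [pv_pyGetD_append_left xs e x hx.1 (by omega)]

theorem pv_sumTo_full (xs : List (Int × Int)) (pid : Int) :
    pvSumTo xs pid (xs.length : Int) = pvSumNP xs pid := by
  unfold pvSumTo pvSumNP
  exact PySem.List.foldl_pyRange_zero_pyGetD xs (0, 0)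
    (fun t p => if p.1 ≠ pid then t + p.2 else t) 0

-- A on an appended entry: snapshot the full non-pid sum if it is a pid entry
theorem pv_wait_time_append (xs : List (Int × Int)) (e : Int × Int) (pid : Int) :
    wait_time (xs ++ [e]) pid =
      if e.1 = pid then pvSumNP xs pid else wait_time xs pid := by
  rw [pv_wait_time_eq, pv_wait_time_eq, pv_lastIdx_append]
  by_cases h : e.1 = pid
  · rw [if_pos h, if_pos h, pv_sumTo_append xs e pid _ le_rfl, pv_sumTo_full]
  · rw [if_neg h, if_neg h, pv_sumTo_append xs e pid _ (pv_lastIdx_bounds xs pid).2]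

theorem pv_sumNP_append (xs : List (Int × Int)) (e : Int × Int) (pid : Int) :
    pvSumNP (xs ++ [e]) pid = if e.1 ≠ pid then pvSumNP xs pid + e.2 else pvSumNP xs pid := by
  unfold pvSumNP
  rw [List.foldl_append]
  simp

-- B's fold state is exactly (running non-pid sum, A's value)
theorem pv_state_eq (gnatt : List (Int × Int)) (pid : Int) :
    gnatt.foldl
      (fun (st : Int × Int) e => if e.1 = pid then (st.1, st.1) else (st.1 + e.2, st.2))
      (0, 0) = (pvSumNP gnatt pid, wait_time gnatt pid) := by
  induction gnatt using List.reverseRecOn with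
  | nil => rfl
  | append_singleton xs e ih =>
    rw [List.foldl_append, ih]
    simp only [List.foldl_cons, List.foldl_nil]
    rw [pv_wait_time_append, pv_sumNP_append]
    by_cases h : e.1 = pid <;> simp [h]

-- ===== VERDICT (by name: the statement is the Claim_ definition above) =====
theorem wait_time_spec : Claim_equal_wait_time := by
  intro gnatt pid _
  unfold Spec_wait_time wait_time_alt
  rw [pv_state_eq]
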